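-- pv_equiv track=rewrite | github.com/bharadwajvyadavalli/coding_markdowns | medium_algorithms.py | single_cycle_check
-- ===== SOURCE A (Python) =====
-- def single_cycle_check(array):
--     """
--     Check if a single cycle exists in an array where each element represents a jump.
--
--     Time Complexity: O(n) - Visit each element at most once
--     Space Complexity: O(1) - Only using a few variables
--
--     Args:
--         array: List of integers representing jumps
--
--     Returns:
--         Boolean indicating if single cycle exists
--     """
--     n = len(array)
--     visited = [False] * n
--     current_idx = 0
--     visited_count = 0
--
--     while visited_count < n:
--         if visited[current_idx]:
--             return False
--
--         visited[current_idx] = True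
--         visited_count += 1
--
--         # Calculate next index
--         jump = array[current_idx]
--         next_idx = (current_idx + jump) % n
--
--         # Handle negative jumps
--         if next_idx < 0:
--             next_idx += n
--
--         current_idx = next_idx
--
--     return current_idx == 0
-- ===== SOURCE B (Python) =====
-- def single_cycle_check(array):
--     """Single-cycle check without the visited array: follow the jumps n times,
--     failing as soon as we return to index 0 early; a single cycle exists iff
--     the walk is back at 0 after exactly n jumps and never before."""
--     n = len(array)
--     num_visited = 0
--     current_idx = 0
--     while num_visited < n:
--         if num_visited > 0 and current_idx == 0:
--             return False
--         num_visited += 1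
--         current_idx = (current_idx + array[current_idx]) % n
--     return current_idx == 0
-- ===== Notes on version B (the rewrite author's own statement) =====
-- stated objective: simpler
-- what changed: B drops the O(n) visited array and its revisit test entirely, keeping only two integers and using the return-to-start invariant of a functional graph: fail if the walk is back at index 0 before n jumps, succeed iff it is at 0 after exactly n jumps.
import Mathlib
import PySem

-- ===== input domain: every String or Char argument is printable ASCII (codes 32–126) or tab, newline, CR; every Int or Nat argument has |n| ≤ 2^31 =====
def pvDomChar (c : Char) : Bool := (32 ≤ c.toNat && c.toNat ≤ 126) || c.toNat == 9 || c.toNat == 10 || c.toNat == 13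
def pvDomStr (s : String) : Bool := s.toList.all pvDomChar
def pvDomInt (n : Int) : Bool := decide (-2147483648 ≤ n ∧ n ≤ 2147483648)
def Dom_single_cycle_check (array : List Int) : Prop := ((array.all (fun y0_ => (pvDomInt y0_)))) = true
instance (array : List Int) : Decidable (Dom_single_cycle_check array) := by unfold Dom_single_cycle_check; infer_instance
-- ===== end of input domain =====

-- B replaces A's O(n) visited array and revisit test by two integers and the
-- return-to-start invariant of a functional graph (same O(n) time, O(1) space).

-- ===== PORT A =====
-- A's while-loop as recursion on the remaining iteration count (n - visited_count).
-- 'visited[current_idx] = True' is PySem.List.pySetD; the 'none' arms are Python's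
-- IndexError, never reached since current_idx is always a mod-n value in [0, n).
def sccLoopA (array : List Int) (visited : List Bool) (current : Int) : Nat → Bool
  | 0 => current == 0
  | fuel+1 =>
    match PySem.List.pyGet? visited current with
    | none => false
    | some v =>
      if v then false
      else
        match PySem.List.pyGet? array current with
        | none => false
        | some jump =>
          let next := PySem.Int.mod (current + jump) (array.length : Int)
          let next := if next < 0 then next + (array.length : Int) else next
          sccLoopA array (PySem.List.pySetD visited current true) next fuel

def single_cycle_check (array : List Int) : Bool :=
  sccLoopA array (List.replicate array.length false) 0 array.length

-- ===== PORT B =====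
-- B's while-loop as recursion on the remaining iteration count (n - num_visited).
def sccLoopB (array : List Int) (numVisited : Nat) (current : Int) : Nat → Bool
  | 0 => current == 0
  | fuel+1 =>
    if numVisited > 0 && current == 0 then false
    else
      match PySem.List.pyGet? array current with
      | none => false
      | some jump =>
        sccLoopB array (numVisited + 1)
          (PySem.Int.mod (current + jump) (array.length : Int)) fuel

def single_cycle_check_alt (array : List Int) : Bool :=
  sccLoopB array 0 0 array.length

-- ===== PRECONDITION & SPEC =====
def Spec_single_cycle_check (array : List Int) (out : Bool) : Prop := out = single_cycle_check_alt array
instance (array : List Int) (out : Bool) : Decidable (Spec_single_cycle_check array out) := by unfold Spec_single_cycle_check; infer_instance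

-- ===== CLAIM (what is proved, stated in full; the proofs are below) =====
def Claim_equal_single_cycle_check : Prop := ∀ (array : List Int), Dom_single_cycle_check array → Spec_single_cycle_check array (single_cycle_check array)

-- ===== LEMMAS AND PROOFS =====

-- The walk both programs follow: traj array k is current_idx after k jumps.
def sccStep (array : List Int) (c : Int) : Int :=
  PySem.Int.mod (c + PySem.List.pyGetD array c 0) (array.length : Int)

def traj (array : List Int) : Nat → Int
  | 0 => 0
  | k+1 => sccStep array (traj array k)

-- A's visited list after k loop iterations.
def vis (array : List Int) (k : Nat) : List Bool :=
  (PySem.List.pyRange 0 array.length 1).map (fun i => decide (∃ j, j < k ∧ traj array j = i))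

theorem traj_bound (array : List Int) (hn : 0 < array.length) (k : Nat) :
    0 ≤ traj array k ∧ traj array k < (array.length : Int) := by
  cases k with
  | zero => simp [traj]; omega
  | succ k =>
    have hb : (0 : Int) < (array.length : Int) := by exact_mod_cast hn
    exact ⟨PySem.Int.mod_nonneg _ hb, PySem.Int.mod_lt _ hb⟩

theorem traj_det (array : List Int) (a b : Nat) (h : traj array a = traj array b) :
    ∀ t, traj array (a + t) = traj array (b + t) := by
  intro t
  induction t with
  | zero => simpa using h
  | succ t ih =>
    show traj array (a + t + 1) = traj array (b + t + 1)
    simp [traj, ih]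

theorem vis_getElem (array : List Int) (k : Nat) (i : Nat) (h : i < (vis array k).length) :
    (vis array k)[i] = decide (∃ j, j < k ∧ traj array j = (i : Int)) := by
  simp only [vis, List.getElem_map, PySem.List.getElem_pyRange_one, zero_add]

theorem length_vis (array : List Int) (k : Nat) : (vis array k).length = array.length := by
  simp [vis, PySem.List.length_pyRange_one]

theorem vis_zero (array : List Int) : vis array 0 = List.replicate array.length false := by
  apply List.ext_getElem
  · simp [length_vis]
  · intro i hi hi'
    rw [vis_getElem array 0 i hi, List.getElem_replicate]
    simp

theorem pyGet?_vis (array : List Int) (k : Nat) (c : Int) (h0 : 0 ≤ c)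
    (h1 : c < (array.length : Int)) :
    PySem.List.pyGet? (vis array k) c = some (decide (∃ j, j < k ∧ traj array j = c)) := by
  rw [PySem.List.pyGet?_eq_some_getElem _ h0 (by rw [length_vis]; exact h1)]
  rw [vis_getElem array k c.toNat (by rw [length_vis]; omega), Int.toNat_of_nonneg h0]

theorem vis_set (array : List Int) (k : Nat) (h0 : 0 ≤ traj array k)
    (_h1 : traj array k < (array.length : Int)) :
    PySem.List.pySetD (vis array k) (traj array k) true = vis array (k + 1) := by
  rw [PySem.List.pySetD_of_nonneg _ _ h0]
  apply List.ext_getElem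
  · simp [length_vis]
  · intro i hi hi'
    have hiv : i < (vis array k).length := by simpa using hi
    rw [List.getElem_set, vis_getElem array (k + 1) i hi']
    by_cases hc : (traj array k).toNat = i
    · simp only [hc, if_true]
      have he : traj array k = (i : Int) := by omega
      have hw : (∃ j, j < k + 1 ∧ traj array j = (i : Int)) := ⟨k, by omega, he⟩
      exact (decide_eq_true hw).symm
    · simp only [hc, if_false, vis_getElem array k i hiv]
      rw [decide_eq_decide]
      constructor
      · rintro ⟨j, hj, he⟩
        exact ⟨j, by omega, he⟩
      · rintro ⟨j, hj, he⟩
        refine ⟨j, ?_, he⟩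
        rcases Nat.lt_succ_iff_lt_or_eq.mp hj with h | h
        · exact h
        · exfalso; apply hc; rw [h] at he; omega

theorem step_some (array : List Int) (hn : 0 < array.length) (k : Nat) :
    PySem.List.pyGet? array (traj array k) =
      some (PySem.List.pyGetD array (traj array k) 0) := by
  obtain ⟨h0, h1⟩ := traj_bound array hn k
  rw [PySem.List.pyGet?_eq_some_getElem _ h0 h1,
      PySem.List.pyGetD_eq_getElem array 0 h0 h1]

theorem Bchar (array : List Int) (hn : 0 < array.length) :
    ∀ (fuel k : Nat), k + fuel = array.length →
    sccLoopB array k (traj array k) fuel =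
      (!(decide (∃ m, m < array.length ∧ 1 ≤ m ∧ k ≤ m ∧ traj array m = 0)) &&
        (traj array array.length == 0)) := by
  intro fuel
  induction fuel with
  | zero =>
    intro k hk
    have hk' : k = array.length := by omega
    subst hk'
    simp only [sccLoopB]
    have : ¬ (∃ m, m < array.length ∧ 1 ≤ m ∧ array.length ≤ m ∧ traj array m = 0) := by
      rintro ⟨m, h2, _, h1, _⟩; omega
    simp [this]
  | succ fuel ih =>
    intro k hk
    have hklt : k < array.length := by omega
    simp only [sccLoopB, step_some array hn k]
    by_cases hg : k > 0 ∧ traj array k = 0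
    · have hgb : (decide (k > 0) && (traj array k == 0)) = true := by
        simp [hg.1, hg.2]
      rw [hgb]
      have : (∃ m, m < array.length ∧ 1 ≤ m ∧ k ≤ m ∧ traj array m = 0) :=
        ⟨k, hklt, by omega, le_refl _, hg.2⟩
      simp [this]
    · have hgb : (decide (k > 0) && (traj array k == 0)) = false := by
        by_cases h1 : k > 0
        · have h2 : traj array k ≠ 0 := fun h => hg ⟨h1, h⟩
          simp [h2]
        · simp [h1]
      rw [hgb]
      simp only [Bool.false_eq_true, if_false]
      have hnext : PySem.Int.mod (traj array k + PySem.List.pyGetD array (traj array k) 0)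
          (array.length : Int) = traj array (k + 1) := rfl
      rw [hnext, ih (k + 1) (by omega)]
      have hdd : decide (∃ m, m < array.length ∧ 1 ≤ m ∧ k + 1 ≤ m ∧ traj array m = 0) =
          decide (∃ m, m < array.length ∧ 1 ≤ m ∧ k ≤ m ∧ traj array m = 0) := by
        rw [decide_eq_decide]
        constructor
        · rintro ⟨m, h3, h1, h2, h4⟩
          exact ⟨m, h3, h1, by omega, h4⟩
        · rintro ⟨m, h3, h1, h2, h4⟩
          refine ⟨m, h3, h1, ?_, h4⟩
          rcases Nat.eq_or_lt_of_le h2 with h | h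
          · exfalso; exact hg ⟨by omega, by rw [h]; exact h4⟩
          · omega
      rw [hdd]

theorem Achar (array : List Int) (hn : 0 < array.length) :
    ∀ (fuel k : Nat), k + fuel = array.length →
    (∀ i j, i < j → j < k → traj array i ≠ traj array j) →
    sccLoopA array (vis array k) (traj array k) fuel =
      (!(decide (∃ j, j < array.length ∧ ∃ i, i < j ∧ traj array i = traj array j)) &&
        (traj array array.length == 0)) := by
  intro fuel
  induction fuel with
  | zero =>
    intro k hk hdist
    have hk' : k = array.length := by omega
    subst hk'
    simp only [sccLoopA]
    have : ¬ (∃ j, j < array.length ∧ ∃ i, i < j ∧ traj array i = traj array j) := by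
      rintro ⟨j, h2, i, h1, h3⟩; exact hdist i j h1 h2 h3
    simp [this]
  | succ fuel ih =>
    intro k hk hdist
    have hklt : k < array.length := by omega
    obtain ⟨h0, h1⟩ := traj_bound array hn k
    simp only [sccLoopA, pyGet?_vis array k _ h0 h1, step_some array hn k]
    by_cases hrep : ∃ j, j < k ∧ traj array j = traj array k
    · simp only [hrep, decide_true, if_true]
      obtain ⟨j, hj, he⟩ := hrep
      have : (∃ j, j < array.length ∧ ∃ i, i < j ∧ traj array i = traj array j) :=
        ⟨k, hklt, j, hj, he⟩
      simp [this]
    · simp only [hrep, decide_false, Bool.false_eq_true, if_false]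
      have hmn : ¬ PySem.Int.mod (traj array k + PySem.List.pyGetD array (traj array k) 0)
          (array.length : Int) < 0 := by
        have hb : (0 : Int) < (array.length : Int) := by exact_mod_cast hn
        have := PySem.Int.mod_nonneg (traj array k + PySem.List.pyGetD array (traj array k) 0) hb
        omega
      simp only [hmn, if_false]
      rw [vis_set array k h0 h1]
      have hnext : PySem.Int.mod (traj array k + PySem.List.pyGetD array (traj array k) 0)
          (array.length : Int) = traj array (k + 1) := rfl
      rw [hnext]
      apply ih (k + 1) (by omega)
      intro i j hij hjk
      rcases Nat.lt_succ_iff_lt_or_eq.mp hjk with h | h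
      · exact hdist i j hij h
      · subst h
        intro he
        exact hrep ⟨i, hij, he⟩

theorem repeat_iff (array : List Int) (_hn : 0 < array.length)
    (hend : traj array array.length = 0) :
    (∃ j, j < array.length ∧ ∃ i, i < j ∧ traj array i = traj array j) ↔
      (∃ m, m < array.length ∧ 1 ≤ m ∧ traj array m = 0) := by
  constructor
  · rintro ⟨j, hjn, i, hij, he⟩
    refine ⟨i + (array.length - j), by omega, by omega, ?_⟩
    have h2 := traj_det array i j he (array.length - j)
    rw [h2]
    have h3 : j + (array.length - j) = array.length := by omega
    rw [h3, hend]
  · rintro ⟨m, h2, h1, h3⟩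
    exact ⟨m, h2, 0, by omega, by rw [h3]; rfl⟩

-- ===== VERDICT (by name: the statement is the Claim_ definition above) =====
theorem single_cycle_check_spec : Claim_equal_single_cycle_check := by
  intro array _
  unfold Spec_single_cycle_check single_cycle_check single_cycle_check_alt
  by_cases hn : 0 < array.length
  · have h0 : traj array 0 = 0 := rfl
    rw [← vis_zero, ← h0]
    rw [Achar array hn array.length 0 (by omega) (by intro i j _ hj; omega),
        Bchar array hn array.length 0 (by omega)]
    by_cases hend : traj array array.length = 0
    · have hiff := repeat_iff array hn hend
      have hdd : decide (∃ j, j < array.length ∧ ∃ i, i < j ∧ traj array i = traj array j) =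
          decide (∃ m, m < array.length ∧ 1 ≤ m ∧ 0 ≤ m ∧ traj array m = 0) := by
        rw [decide_eq_decide, hiff]
        constructor
        · rintro ⟨m, a, b, d⟩; exact ⟨m, a, b, by omega, d⟩
        · rintro ⟨m, a, b, _, d⟩; exact ⟨m, a, b, d⟩
      rw [hdd]
    · have hb : (traj array array.length == 0) = false := by simpa using hend
      simp [hb]
  · have h0 : array.length = 0 := by omega
    rw [h0]
    simp [sccLoopA, sccLoopB]
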